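-- pv_equiv track=rewrite | github.com/0xseo/Algo_prac | 프로그래머스/2/76502. 괄호 회전하기/괄호 회전하기.py | solution
-- ===== SOURCE A (Python) =====
-- def solution(s):
--     answer = 0
--     for i in range(len(s)):
--         stack = []
--         word = s[i:] + s[:i]
--         flag = True
--         for w in word:
--             if w == '[' or w == '{' or w == '(':
--                 stack.append(w)
--             else:
--                 if len(stack) == 0:
--                     flag = False
--                     break
--                 toCheck = stack.pop()
--                 if w == ']' and toCheck == '[':
--                     continue
--                 if w == '}' and toCheck == '{':
--                     continue
--                 if w == ')' and toCheck == '(':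
--                     continue
--                 else:
--                     flag = False
--                     break
--         if flag and len(stack) == 0:
--             answer += 1
--     return answer
-- ===== SOURCE B (Python) =====
-- def solution(s):
--     # Prune: a rotation can only be valid if every char is a bracket, the total
--     # balance is 0, and the cut point i is a global minimum of the prefix sums;
--     # only those candidate rotations get the stack check.
--     if any(c not in '()[]{}' for c in s):
--         return 0
--     n = len(s)
--     pref = [0]
--     run = 0
--     for c in s:
--         run += 1 if c in '([{' else -1
--         pref.append(run)
--     if run != 0:
--         return 0
--     m = min(pref)
--     count = 0
--     for i in range(n):
--         if pref[i] != m: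
--             continue
--         stack = []
--         ok = True
--         for c in s[i:] + s[:i]:
--             if c in '([{':
--                 stack.append({'(': ')', '[': ']', '{': '}'}[c])
--             elif not stack or stack.pop() != c:
--                 ok = False
--                 break
--         if ok and not stack:
--             count += 1
--     return count
-- ===== Notes on version B (the rewrite author's own statement) =====
-- stated objective: faster
-- what changed: B checks the whole string once (all-bracket test, total balance, prefix-sum global minima) and runs the stack validity check only on the candidate cut points whose prefix sum attains the global minimum, instead of A's stack scan of every rotation.
import Mathlib
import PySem

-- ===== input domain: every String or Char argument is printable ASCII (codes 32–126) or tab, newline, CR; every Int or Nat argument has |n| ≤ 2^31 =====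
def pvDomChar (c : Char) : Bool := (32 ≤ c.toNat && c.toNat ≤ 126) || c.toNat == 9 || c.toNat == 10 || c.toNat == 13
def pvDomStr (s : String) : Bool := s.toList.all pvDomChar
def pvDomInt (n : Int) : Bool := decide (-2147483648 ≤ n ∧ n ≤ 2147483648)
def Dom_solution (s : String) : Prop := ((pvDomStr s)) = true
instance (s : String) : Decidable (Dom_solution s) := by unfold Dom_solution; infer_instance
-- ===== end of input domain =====

-- B prunes with one global pass (all-bracket / total balance / prefix-sum minimum cut points) and stack-checks only candidate rotations; A stack-checks every rotation.

-- ===== PORT A =====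
-- A's inner 'for w in word' loop with its stack, early break, and final 'flag and len(stack)==0'.
def runA : List Char → List Char → Bool
  | [], st => st.isEmpty
  | w :: cs, st =>
    if w = '[' ∨ w = '{' ∨ w = '(' then runA cs (w :: st)
    else
      match st with
      | [] => false
      | t :: st' =>
        if (w = ']' ∧ t = '[') ∨ (w = '}' ∧ t = '{') ∨ (w = ')' ∧ t = '(') then runA cs st'
        else false

def solution (s : String) : Int :=
  let l := s.toList
  (PySem.List.pyRange 0 (l.length : Int) 1).foldl
    (fun answer i =>
      let word := PySem.List.slice l (some i) none ++ PySem.List.slice l none (some i)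
      if runA word [] then answer + 1 else answer)
    0

-- ===== PORT B =====
def isOpenB (c : Char) : Bool := c = '(' || c = '[' || c = '{'

def closeB (c : Char) : Char := if c = '(' then ')' else if c = '[' then ']' else '}'

-- B's candidate check: stack of EXPECTED closers, 'elif not stack or stack.pop() != c'.
def runB : List Char → List Char → Bool
  | [], st => st.isEmpty
  | c :: cs, st =>
    if isOpenB c then runB cs (closeB c :: st)
    else
      match st with
      | [] => false
      | t :: st' => if t = c then runB cs st' else false

def solution_alt (s : String) : Int :=
  let l := s.toList
  if l.any (fun c => !(['(', ')', '[', ']', '{', '}'].contains c)) then 0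
  else
    let n : Int := (l.length : Int)
    -- pref/run loop: pref collects the prefix sums, run is the running balance
    let pr := l.foldl
      (fun (st : List Int × Int) c =>
        let run := st.2 + (if isOpenB c then 1 else -1)
        (st.1 ++ [run], run))
      ([(0 : Int)], (0 : Int))
    if pr.2 ≠ 0 then 0
    else
      -- min(pref); pref is nonempty ([0] to start), so Python's min never raises
      let m := (PySem.List.min? pr.1 (fun x => x)).getD 0
      (PySem.List.pyRange 0 n 1).foldl
        (fun count i =>
          -- pref[i]: i is in range(n) and pref has n+1 entries, so the lookup never fails
          if PySem.List.pyGetD pr.1 i 0 ≠ m then count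
          else
            let word := PySem.List.slice l (some i) none ++ PySem.List.slice l none (some i)
            if runB word [] then count + 1 else count)
        0

-- ===== PRECONDITION & SPEC =====
def Spec_solution (s : String) (out : Int) : Prop := out = solution_alt s
instance (s : String) (out : Int) : Decidable (Spec_solution s out) := by unfold Spec_solution; infer_instance

-- ===== CLAIM (what is proved, stated in full; the proofs are below) =====
def Claim_equal_solution : Prop := ∀ (s : String), Dom_solution s → Spec_solution s (solution s)

-- ===== LEMMAS AND PROOFS =====

-- proof-side abbreviations
def isBr (c : Char) : Bool := ['(', ')', '[', ']', '{', '}'].contains c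
def valB (c : Char) : Int := if isOpenB c then 1 else -1
def sumv (cs : List Char) : Int := (cs.map valB).sum
-- P l j : the prefix-sum of the first j characters
def P (l : List Char) (j : Nat) : Int := sumv (l.take j)

theorem runA_cons (w : Char) (cs st : List Char) : runA (w :: cs) st =
    (if w = '[' ∨ w = '{' ∨ w = '(' then runA cs (w :: st)
     else match st with
       | [] => false
       | t :: st' =>
         if (w = ']' ∧ t = '[') ∨ (w = '}' ∧ t = '{') ∨ (w = ')' ∧ t = '(') then runA cs st'
         else false) := rfl

theorem runB_cons (c : Char) (cs st : List Char) : runB (c :: cs) st =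
    (if isOpenB c then runB cs (closeB c :: st)
     else match st with
       | [] => false
       | t :: st' => if t = c then runB cs st' else false) := rfl

theorem sumv_nil : sumv [] = 0 := rfl
theorem sumv_cons (c : Char) (cs : List Char) : sumv (c :: cs) = valB c + sumv cs := by
  simp [sumv]
theorem sumv_append (a b : List Char) : sumv (a ++ b) = sumv a + sumv b := by
  simp [sumv]

-- a rotation has the same total as the original
theorem sumv_rot (l : List Char) (i : Nat) : sumv (l.drop i ++ l.take i) = sumv l := by
  rw [sumv_append]
  conv_rhs => rw [← List.take_append_drop i l]
  rw [sumv_append]; ring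

-- L1: a non-bracket character anywhere makes A's check fail, whatever the stack
theorem runA_junk (cs : List Char) (st : List Char)
    (h : ∃ c ∈ cs, isBr c = false) : runA cs st = false := by
  induction cs generalizing st with
  | nil => obtain ⟨c, hc, _⟩ := h; simp at hc
  | cons w cs ih =>
    obtain ⟨c, hc, hcb⟩ := h
    rw [runA_cons]
    split
    · rename_i hw
      apply ih
      refine ⟨c, ?_, hcb⟩
      rcases List.mem_cons.mp hc with h1 | h1
      · exfalso; subst h1; rcases hw with h | h | h <;> simp [h, isBr] at hcb
      · exact h1
    · rename_i hw
      match st with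
      | [] => rfl
      | t :: st' =>
        simp only
        split
        · rename_i hm
          apply ih
          refine ⟨c, ?_, hcb⟩
          rcases List.mem_cons.mp hc with h1 | h1
          · exfalso; subst h1
            rcases hm with ⟨h, _⟩ | ⟨h, _⟩ | ⟨h, _⟩ <;> simp [h, isBr] at hcb
          · exact h1
        · rfl

-- L2: A's stack of opens and B's stack of expected closers run in lockstep
theorem runA_eq_runB (cs : List Char) (st : List Char)
    (h : ∀ t ∈ st, isOpenB t = true) : runA cs st = runB cs (st.map closeB) := by
  induction cs generalizing st with
  | nil => simp [runA, runB]
  | cons w cs ih =>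
    rw [runA_cons, runB_cons]
    by_cases hw : isOpenB w
    · have hw' : w = '[' ∨ w = '{' ∨ w = '(' := by
        simp [isOpenB] at hw; tauto
      rw [if_pos hw', if_pos hw]
      have : (closeB w :: st.map closeB) = (w :: st).map closeB := by simp
      rw [this]
      apply ih
      intro t ht
      rcases List.mem_cons.mp ht with h1 | h1
      · subst h1; exact hw
      · exact h t h1
    · have hw' : ¬(w = '[' ∨ w = '{' ∨ w = '(') := by
        simp [isOpenB] at hw; tauto
      rw [if_neg hw', if_neg hw]
      match st with
      | [] => rfl
      | t :: st' =>
        simp only [List.map_cons]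
        have ht := h t (List.mem_cons_self ..)
        have htc : t = '(' ∨ t = '[' ∨ t = '{' := by simp [isOpenB] at ht; tauto
        have hcond : ((w = ']' ∧ t = '[') ∨ (w = '}' ∧ t = '{') ∨ (w = ')' ∧ t = '(')) ↔ closeB t = w := by
          rcases htc with h1 | h1 | h1 <;> subst h1 <;> simp [closeB] <;> constructor <;> intro hx <;> exact hx.symm
        by_cases hcd : closeB t = w
        · rw [if_pos (hcond.mpr hcd), if_pos hcd]
          exact ih st' (fun x hx => h x (List.mem_cons_of_mem _ hx))
        · rw [if_neg (fun hx => hcd (hcond.mp hx)), if_neg hcd]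

-- L3/L4: when A's check succeeds, stack depth tracks the ±1 balance:
-- the total balance closes the initial stack, and every prefix stays nonnegative
theorem runA_sum (cs : List Char) (st : List Char) (h : runA cs st = true) :
    ((st.length : Int) + sumv cs = 0) ∧ (∀ k : Nat, 0 ≤ (st.length : Int) + sumv (cs.take k)) := by
  induction cs generalizing st with
  | nil =>
    rw [runA] at h
    have : st = [] := by simpa using h
    subst this
    constructor
    · simp [sumv]
    · intro k; simp [sumv]
  | cons w cs ih =>
    rw [runA_cons] at h
    split at h
    · rename_i hw
      have hov : valB w = 1 := by
        rcases hw with h1 | h1 | h1 <;> simp [valB, isOpenB, h1]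
      obtain ⟨h1, h2⟩ := ih (w :: st) h
      constructor
      · rw [sumv_cons, hov]; simp at h1 ⊢; omega
      · intro k
        match k with
        | 0 => simp [sumv]
        | k + 1 =>
          have := h2 k
          rw [List.take_succ_cons, sumv_cons, hov]
          simp at this ⊢; omega
    · rename_i hw
      match st with
      | [] => simp at h
      | t :: st' =>
        simp only at h
        split at h
        · rename_i hm
          have hov : valB w = -1 := by
            have : ¬ isOpenB w = true := by
              rcases hm with ⟨h1, _⟩ | ⟨h1, _⟩ | ⟨h1, _⟩ <;> subst h1 <;> simp [isOpenB]
            simp [valB, this]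
          obtain ⟨h1, h2⟩ := ih st' h
          constructor
          · rw [sumv_cons, hov]; simp at h1 ⊢; omega
          · intro k
            match k with
            | 0 => simp [sumv]; omega
            | k + 1 =>
              have := h2 k
              rw [List.take_succ_cons, sumv_cons, hov]
              simp at this ⊢; omega
        · simp at h
-- L5: characterisation of B's pref/run fold
theorem foldB_eq (cs : List Char) (acc : List Int) (r : Int) :
    cs.foldl (fun (st : List Int × Int) c =>
        (st.1 ++ [st.2 + (if isOpenB c then 1 else -1)], st.2 + (if isOpenB c then 1 else -1))) (acc, r)
    = (acc ++ (List.range cs.length).map (fun k => r + sumv (cs.take (k + 1))), r + sumv cs) := by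
  induction cs generalizing acc r with
  | nil => simp [sumv]
  | cons c cs ih =>
    rw [List.foldl_cons, ih]
    have hv : (if isOpenB c then (1:Int) else -1) = valB c := rfl
    simp only [Prod.mk.injEq]
    refine ⟨?_, ?_⟩
    · simp [List.range_succ_eq_map, List.map_map, Function.comp, List.take_succ_cons,
        sumv_cons, sumv_nil, hv, add_assoc]
    · simp [sumv_cons, hv, add_assoc]

-- the pref list is the prefix-sum table
theorem pref_eq (l : List Char) :
    l.foldl (fun (st : List Int × Int) c =>
        (st.1 ++ [st.2 + (if isOpenB c then 1 else -1)], st.2 + (if isOpenB c then 1 else -1))) ([(0:Int)], (0:Int))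
    = ((List.range (l.length + 1)).map (fun j => P l j), sumv l) := by
  rw [foldB_eq]
  simp only [Prod.mk.injEq]
  refine ⟨?_, ?_⟩
  · rw [List.range_succ_eq_map, List.map_cons, List.map_map]
    simp [P, sumv, Function.comp]
  · simp

-- L7: a valid rotation's cut point is a global minimum of the prefix sums
theorem valid_min (l : List Char) (i : Nat) (hi : i ≤ l.length)
    (h : runA (l.drop i ++ l.take i) [] = true) :
    sumv l = 0 ∧ ∀ j ≤ l.length, P l i ≤ P l j := by
  obtain ⟨h1, h2⟩ := runA_sum _ _ h
  simp only [List.length_nil, Nat.cast_zero, zero_add] at h1 h2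
  have htot : sumv l = 0 := by rw [sumv_rot] at h1; exact h1
  refine ⟨htot, ?_⟩
  intro j hj
  by_cases hij : i ≤ j
  · have hk := h2 (j - i)
    have hlen : j - i ≤ (l.drop i).length := by simp; omega
    rw [List.take_append_of_le_length hlen] at hk
    have hsplit : l.take j = l.take i ++ (l.drop i).take (j - i) := by
      rw [← List.take_add]; congr 1; omega
    have : P l j = P l i + sumv ((l.drop i).take (j - i)) := by
      rw [P, hsplit, sumv_append]; rfl
    omega
  · have hk := h2 ((l.drop i).length + j)
    rw [List.take_length_add_append] at hk
    rw [sumv_append] at hk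
    have hdrop : sumv (l.drop i) = sumv l - P l i := by
      conv_rhs => rw [← List.take_append_drop i l, sumv_append]
      simp [P]
    have htt : (l.take i).take j = l.take j := by
      rw [List.take_take]; congr 1; omega
    rw [htt] at hk
    have : sumv (l.take j) = P l j := rfl
    omega

-- membership of a prefix sum in the pref table
theorem P_mem_pref (l : List Char) (j : Nat) (hj : j ≤ l.length) :
    P l j ∈ (List.range (l.length + 1)).map (fun j => P l j) := by
  exact List.mem_map.mpr ⟨j, List.mem_range.mpr (by omega), rfl⟩
-- ===== LEMMAS AND PROOFS =====

-- A's check agrees with B's check on a word started from the empty stack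
theorem rot_runA_eq_runB (w : List Char) : runA w [] = runB w [] := by
  simpa using runA_eq_runB w [] (by simp)

-- the whole equivalence, stated on the character list
theorem main_eq (l : List Char) :
    (PySem.List.pyRange 0 (l.length : Int) 1).foldl
      (fun answer i =>
        if runA (PySem.List.slice l (some i) none ++ PySem.List.slice l none (some i)) [] then
          answer + 1 else answer) (0 : Int)
    = (if l.any (fun c => !(['(', ')', '[', ']', '{', '}'].contains c)) then 0
       else if (l.foldl (fun (st : List Int × Int) c =>
             (st.1 ++ [st.2 + (if isOpenB c then 1 else -1)], st.2 + (if isOpenB c then 1 else -1)))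
           ([(0 : Int)], (0 : Int))).2 ≠ 0 then 0
       else
         (PySem.List.pyRange 0 (l.length : Int) 1).foldl
           (fun count i =>
             if PySem.List.pyGetD (l.foldl (fun (st : List Int × Int) c =>
                   (st.1 ++ [st.2 + (if isOpenB c then 1 else -1)], st.2 + (if isOpenB c then 1 else -1)))
                 ([(0 : Int)], (0 : Int))).1 i 0
                ≠ (PySem.List.min? (l.foldl (fun (st : List Int × Int) c =>
                     (st.1 ++ [st.2 + (if isOpenB c then 1 else -1)], st.2 + (if isOpenB c then 1 else -1)))
                   ([(0 : Int)], (0 : Int))).1 (fun x => x)).getD 0 then count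
             else if runB (PySem.List.slice l (some i) none ++ PySem.List.slice l none (some i)) [] then
               count + 1 else count) (0 : Int)) := by
  by_cases hjunk : l.any (fun c => !(['(', ')', '[', ']', '{', '}'].contains c)) = true
  · rw [if_pos hjunk]
    obtain ⟨c, hc, hcb⟩ := List.any_eq_true.mp hjunk
    have hcb' : isBr c = false := by
      simp only [Bool.not_eq_eq_eq_not, Bool.not_true] at hcb
      simpa [isBr] using hcb
    refine (PySem.List.foldl_congr_mem _ _ (fun acc _ => acc) (0 : Int) ?_).trans
      (PySem.List.foldl_ignore _ _)
    intro acc i hi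
    obtain ⟨h0, h1⟩ := PySem.List.mem_pyRange_one.mp hi
    rw [PySem.List.slice_from l h0, PySem.List.slice_to l h0]
    have hcw : c ∈ l.drop i.toNat ++ l.take i.toNat := by
      have h := hc
      conv at h => rw [← List.take_append_drop i.toNat l]
      rw [List.mem_append] at h
      rw [List.mem_append]
      tauto
    simp [runA_junk _ _ ⟨c, hcw, hcb'⟩]
  · rw [if_neg hjunk]
    simp only [pref_eq]
    by_cases hs : sumv l = 0
    · rw [if_neg (by simpa using hs)]
      obtain ⟨m0, hmin⟩ : ∃ m0,
          PySem.List.min? ((List.range (l.length + 1)).map (fun j => P l j)) (fun x => x) = some m0 := by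
        cases h : PySem.List.min? ((List.range (l.length + 1)).map (fun j => P l j)) (fun x => x) with
        | some m0 => exact ⟨m0, rfl⟩
        | none =>
          exfalso
          have := (PySem.List.min?_eq_none_iff _ _).mp h
          simp at this
      rw [hmin, Option.getD_some]
      have hle := PySem.List.min?_isMin hmin
      obtain ⟨k0, hk0, hm0⟩ := List.mem_map.mp (PySem.List.min?_mem hmin)
      have hk0' : k0 ≤ l.length := by have := List.mem_range.mp hk0; omega
      apply PySem.List.foldl_congr_mem
      intro acc i hi
      obtain ⟨h0, h1⟩ := PySem.List.mem_pyRange_one.mp hi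
      have hjlen : i.toNat < l.length := by omega
      rw [PySem.List.slice_from l h0, PySem.List.slice_to l h0]
      have hget : PySem.List.pyGetD ((List.range (l.length + 1)).map (fun j => P l j)) i 0
          = P l i.toNat := by
        rw [PySem.List.pyGetD_eq_getElem _ _ h0 (by simp; omega)]
        simp
      rw [hget]
      by_cases hP : P l i.toNat = m0
      · rw [rot_runA_eq_runB]
        simp [hP]
      · have hfalse : runA (l.drop i.toNat ++ l.take i.toNat) [] = false := by
          cases hr : runA (l.drop i.toNat ++ l.take i.toNat) [] with
          | false => rfl
          | true =>
            exfalso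
            have h2 := (valid_min l i.toNat (le_of_lt hjlen) hr).2 k0 hk0'
            have h3 := hle (P l i.toNat) (P_mem_pref l i.toNat (le_of_lt hjlen))
            exact hP (le_antisymm (hm0 ▸ h2) h3)
        simp [hfalse, hP]
    · rw [if_pos (by simpa using hs)]
      refine (PySem.List.foldl_congr_mem _ _ (fun acc _ => acc) (0 : Int) ?_).trans
        (PySem.List.foldl_ignore _ _)
      intro acc i hi
      obtain ⟨h0, h1⟩ := PySem.List.mem_pyRange_one.mp hi
      rw [PySem.List.slice_from l h0, PySem.List.slice_to l h0]
      have hfalse : runA (l.drop i.toNat ++ l.take i.toNat) [] = false := by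
        cases hr : runA (l.drop i.toNat ++ l.take i.toNat) [] with
        | false => rfl
        | true =>
          exfalso
          have h1' := (runA_sum _ _ hr).1
          rw [sumv_rot] at h1'
          simp at h1'
          exact hs h1'
      simp [hfalse]

-- ===== VERDICT (by name: the statement is the Claim_ definition above) =====
theorem solution_spec : Claim_equal_solution := by
  intro s _
  show solution s = solution_alt s
  exact main_eq s.toList
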